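-- pv_equiv track=rewrite | github.com/miliar/Code_Jam_Webscraper | solutions_python/solutions_year16_round4_nr1/108.py | makeStuff
-- ===== SOURCE A (Python) =====
-- def makeStuff(n, i, trip):
-- 	reverse = (n % 2 == 0)
-- 	arr = ['PRS'[i]]
-- 	for j in range(n):
-- 		nextArr = []
-- 		for el in arr:
-- 			remaining = {'P', 'R', 'S'} - {el}
-- 			nextArr.extend(sorted(remaining, reverse=reverse))
-- 		arr = nextArr
-- 		reverse = not reverse
-- 	return arr
-- ===== SOURCE B (Python) =====
-- def makeStuff(n, i, trip):
--     def expand(el, k, rev):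
--         if k <= 0:
--             return [el]
--         children = sorted({'P', 'R', 'S'} - {el}, reverse=rev)
--         return [x for c in children for x in expand(c, k - 1, not rev)]
--     return expand('PRS'[i], n, n % 2 == 0)
-- ===== Notes on version B (the rewrite author's own statement) =====
-- stated objective: alternative
-- what changed: Replaces the level-by-level breadth-first doubling (rebuild the whole array n times) with a depth-first recursive expansion over the implicit binary tree, the per-level reverse flag toggling along the recursion.
import Mathlib
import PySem

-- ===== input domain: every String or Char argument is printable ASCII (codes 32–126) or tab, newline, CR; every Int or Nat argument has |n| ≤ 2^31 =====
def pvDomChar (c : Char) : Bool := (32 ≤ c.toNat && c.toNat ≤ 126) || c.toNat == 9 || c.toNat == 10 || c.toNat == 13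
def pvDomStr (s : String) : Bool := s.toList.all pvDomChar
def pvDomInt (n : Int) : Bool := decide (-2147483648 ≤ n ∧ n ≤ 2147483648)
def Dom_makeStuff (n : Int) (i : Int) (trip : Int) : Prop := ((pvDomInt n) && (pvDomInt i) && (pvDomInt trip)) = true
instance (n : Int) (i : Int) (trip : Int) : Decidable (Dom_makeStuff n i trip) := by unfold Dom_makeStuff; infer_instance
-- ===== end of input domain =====

-- B replaces A's breadth-first level-by-level doubling with a depth-first recursive
-- expansion of the same implicit binary tree (objective: alternative decomposition).

-- ===== PORT A =====
def makeStuff (n : Int) (i : Int) (trip : Int) : List String :=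
  let reverse := decide (PySem.Int.mod n 2 = 0)
  let arr : List String :=
    match PySem.Str.pyGet? "PRS" i with
    | some c => [String.mk [c]]
    | none => []   -- IndexError in Python; excluded by Pre_makeStuff
  let st := (PySem.List.pyRange 0 n 1).foldl
    (fun (st : List String × Bool) _ =>
      let nextArr := st.1.foldl
        (fun nextArr el =>
          let remaining := PySem.Set.diff (PySem.Set.ofList ["P", "R", "S"]) (PySem.Set.ofList [el])
          nextArr ++ PySem.List.sorted remaining (fun x => x) st.2) []
      (nextArr, !st.2)) (arr, reverse)
  st.1

-- ===== PORT B =====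
def expandAlt (el : String) (k : Int) (rev : Bool) : List String :=
  if k ≤ 0 then [el]
  else
    let children := PySem.List.sorted
      (PySem.Set.diff (PySem.Set.ofList ["P", "R", "S"]) (PySem.Set.ofList [el])) (fun x => x) rev
    children.flatMap (fun c => expandAlt c (k - 1) (!rev))
termination_by k.toNat
decreasing_by omega

def makeStuff_alt (n : Int) (i : Int) (trip : Int) : List String :=
  match PySem.Str.pyGet? "PRS" i with
  | some c => expandAlt (String.mk [c]) n (decide (PySem.Int.mod n 2 = 0))
  | none => []   -- IndexError in Python; excluded by Pre_makeStuff

-- ===== PRECONDITION & SPEC =====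
-- Pre_ excludes exactly the i on which 'PRS'[i] raises IndexError in Python.
def Pre_makeStuff (n : Int) (i : Int) (trip : Int) : Prop := -3 ≤ i ∧ i < 3
instance (n : Int) (i : Int) (trip : Int) : Decidable (Pre_makeStuff n i trip) := by unfold Pre_makeStuff; infer_instance
def pvWitness_makeStuff : Int × Int × Int := (3, 0, 0)

def Spec_makeStuff (n : Int) (i : Int) (trip : Int) (out : List String) : Prop := out = makeStuff_alt n i trip
instance (n : Int) (i : Int) (trip : Int) (out : List String) : Decidable (Spec_makeStuff n i trip out) := by unfold Spec_makeStuff; infer_instance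

-- ===== CLAIM (what is proved, stated in full; the proofs are below) =====
def Claim_equal_makeStuff : Prop := ∀ (n : Int) (i : Int) (trip : Int), Dom_makeStuff n i trip → Pre_makeStuff n i trip → Spec_makeStuff n i trip (makeStuff n i trip)

-- ===== LEMMAS AND PROOFS =====

-- children of an element at a level with reverse flag rev (the common subexpression)
def childrenOf (rev : Bool) (el : String) : List String :=
  PySem.List.sorted
    (PySem.Set.diff (PySem.Set.ofList ["P", "R", "S"]) (PySem.Set.ofList [el])) (fun x => x) rev

-- Nat-fuel version of the recursive expansion
def expandN : Nat → Bool → String → List String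
  | 0, _, el => [el]
  | m + 1, rev, el => (childrenOf rev el).flatMap (expandN m (!rev))

theorem expandAlt_eq_expandN (m : Nat) (el : String) (k : Int) (rev : Bool)
    (hk : k.toNat = m) : expandAlt el k rev = expandN m rev el := by
  induction m generalizing el k rev with
  | zero =>
    rw [expandAlt]
    simp only [expandN]
    have : k ≤ 0 := by omega
    simp [this]
  | succ m ih =>
    rw [expandAlt]
    have hk' : ¬ k ≤ 0 := by omega
    simp only [hk', if_false, expandN, childrenOf]
    congr 1
    funext c
    exact ih c (k - 1) (!rev) (by omega)

-- one BFS level of A, as a flatMap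
theorem level_eq_flatMap (rev : Bool) (arr : List String) :
    arr.foldl
      (fun nextArr el =>
        let remaining := PySem.Set.diff (PySem.Set.ofList ["P", "R", "S"]) (PySem.Set.ofList [el])
        nextArr ++ PySem.List.sorted remaining (fun x => x) rev) []
    = arr.flatMap (childrenOf rev) := by
  have h : ∀ (acc : List String),
      arr.foldl (fun nextArr el =>
        nextArr ++ PySem.List.sorted
          (PySem.Set.diff (PySem.Set.ofList ["P", "R", "S"]) (PySem.Set.ofList [el])) (fun x => x) rev) acc
      = acc ++ arr.flatMap (childrenOf rev) := by
    induction arr with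
    | nil => intro acc; simp
    | cons x xs ih =>
      intro acc
      simp only [List.foldl_cons, List.flatMap_cons, ih, childrenOf]
      simp [List.append_assoc]
  simpa using h []

-- the BFS fold over any index list of length m equals the DFS expansion flatMapped over arr
theorem fold_eq_expand (l : List Int) (arr : List String) (rev : Bool) :
    (l.foldl
      (fun (st : List String × Bool) _ =>
        let nextArr := st.1.foldl
          (fun nextArr el =>
            let remaining := PySem.Set.diff (PySem.Set.ofList ["P", "R", "S"]) (PySem.Set.ofList [el])
            nextArr ++ PySem.List.sorted remaining (fun x => x) st.2) []
        (nextArr, !st.2)) (arr, rev)).1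
    = arr.flatMap (expandN l.length rev) := by
  induction l generalizing arr rev with
  | nil => simp [expandN]
  | cons j l ih =>
    simp only [List.foldl_cons, List.length_cons]
    show (List.foldl _ (arr.foldl _ [], !rev) l).1 = _
    rw [level_eq_flatMap, ih, List.flatMap_assoc]
    rfl

theorem makeStuff_spec : Claim_equal_makeStuff := by
  intro n i trip _hDom _hPre
  unfold Spec_makeStuff makeStuff makeStuff_alt
  cases h : PySem.Str.pyGet? "PRS" i with
  | none =>
    exfalso
    obtain ⟨h1, h2⟩ := _hPre
    interval_cases i <;> revert h <;> decide
  | some c =>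
    rw [fold_eq_expand]
    show _ = expandAlt (String.mk [c]) n (decide (PySem.Int.mod n 2 = 0))
    rw [expandAlt_eq_expandN (n.toNat) _ n _ rfl]
    have hl : (PySem.List.pyRange 0 n 1).length = n.toNat := by
      rw [PySem.List.length_pyRange_one]; omega
    rw [hl]
    simp
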